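-- pv_equiv track=rewrite | github.com/marishkasept/Python-basic-Doom-Patrol | my_homeworks/lab 3.py | mod_px_lst
-- ===== SOURCE A (Python) =====
-- px_lst = list(map(int,'100000000000000000000000000000000000000000000000000000000000000000000000000000000000000000000000000000000000000000000000000000000000000000000000000000000000000000000000000000000000000000000000000000000000000000000000000000000000000000000000000000000000000000000000000000000000000000100001000011'))
--
-- def remove_zeros(a):
--     while a[0] == 0 and len(a) > 1:
--         a.pop(0)
--     return a
--
-- def regulation(a, b):
--     a = remove_zeros(a)
--     b = remove_zeros(b)
--     if len(a) == len(b):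
--         i = 0
--         while i < len(a)-1 and a[i] == b[i]:
--             i += 1
--         if a[i] < b[i]:
--             return 0
--         else:
--             return 1
--     elif len(a) < len(b):
--         return 0
--     return 1
--
-- def add_zeros(a, b):
--     if regulation(a, b) == 1:
--         while len(b) != len(a):
--             b = [0] + b
--     else:
--         while len(a) != len(b):
--             a = [0] + a
--     return a, b
--
-- def gf_add(a, b):
--     a, b = add_zeros(a, b)
--     c = list()
--     for i in range(len(a)):
--         c.append((a[i] + b[i]) % 2)
--     c = remove_zeros(c)
--     return c
--
-- def gf_mul(a, b):
--     new_len = max(len(a), len(b))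
--     c = [0]*new_len*2
--     a.reverse()
--     b.reverse()
--     i = 0
--     while i < len(a):
--         if a[i] == 0:
--             i += 1
--             continue
--         else:
--             j = 0
--             while j < len(b):
--                 if b[j] == 0:
--                     j += 1
--                     continue
--                 else:
--                     c[i+j] += 1
--                     c[i+j] %= 2
--                 j += 1
--         i += 1
--     a.reverse()
--     b.reverse()
--     c.reverse()
--     c = remove_zeros(c)
--     return c
--
-- def mod_px_lst(a):
--     a = remove_zeros(a)
--     if len(a) < len(px_lst):
--         return a
--     else:
--         new_len = len(a) - len(px_lst) + 1
--         b = [1] + [0]*(new_len - 1)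
--         c = gf_mul(px_lst, b)
--         a = gf_add(a, c)
--         a = mod_px_lst(a)
--         a = remove_zeros(a)
--         return a
-- ===== SOURCE B (Python) =====
-- # GF(2) reduction modulo the fixed polynomial, done on a single Python integer:
-- # pack the (mod-2) coefficients into one int and XOR the shifted divisor under each
-- # leading bit, instead of A's recursive list-based multiply/add/re-trim.
-- # Return-value equivalence only: A pops leading zeros off the caller's list in place
-- # (remove_zeros); B never mutates its argument.
-- px_lst = list(map(int,'100000000000000000000000000000000000000000000000000000000000000000000000000000000000000000000000000000000000000000000000000000000000000000000000000000000000000000000000000000000000000000000000000000000000000000000000000000000000000000000000000000000000000000000000000000000000000000100001000011'))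
--
-- PX = (1 << 293) | (1 << 11) | (1 << 6) | (1 << 1) | 1
--
-- def mod_px_lst(a):
--     i = (next((k for k, x in enumerate(a) if x != 0), None))
--     if i is None:
--         i = len(a) - 1
--     t = a[i:]
--     if len(t) < 294:
--         return t
--     n = 0
--     for x in t:
--         n = n * 2 + x % 2
--     while n.bit_length() >= 294:
--         n ^= PX << (n.bit_length() - 294)
--     return [int(c) for c in bin(n)[2:]]
-- ===== Notes on version B (the rewrite author's own statement) =====
-- stated objective: faster
-- what changed: A reduces by recursively multiplying px_lst by a power of x (gf_mul's nested scans), gf-adding and re-trimming lists, one recursion level per cancelled bit; B packs the mod-2 coefficients into a single Python integer and runs the XOR long-division loop (n ^= PX << (bit_length-294)) on that integer, decoding the remainder back to a digit list.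
import Mathlib
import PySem

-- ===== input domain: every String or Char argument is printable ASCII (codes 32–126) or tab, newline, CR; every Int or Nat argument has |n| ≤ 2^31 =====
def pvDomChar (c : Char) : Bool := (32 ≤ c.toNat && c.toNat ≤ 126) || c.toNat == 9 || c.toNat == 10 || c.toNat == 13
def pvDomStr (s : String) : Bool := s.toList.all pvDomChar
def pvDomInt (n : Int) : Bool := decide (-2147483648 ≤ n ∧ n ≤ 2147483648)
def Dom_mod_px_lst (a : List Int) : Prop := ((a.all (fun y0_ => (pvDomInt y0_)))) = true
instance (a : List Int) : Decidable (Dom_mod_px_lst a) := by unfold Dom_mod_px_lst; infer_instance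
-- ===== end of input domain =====

-- B packs the mod-2 coefficients into one natural number and reduces by XORing the
-- shifted divisor under each leading bit, instead of A's recursive list-based
-- multiply/add/re-trim reduction (objective: faster).
-- Return-value equivalence only: Python A pops leading zeros off the caller's list in
-- place (remove_zeros); B never mutates its argument.  (CPython may also hit its
-- recursion limit running A on very long inputs; the ports are about A's value.)

-- ===== PORT A =====
-- px_lst = list(map(int,'1000…0011'))  (294 bits)
def pxA : List Int := [1, 0, 0, 0, 0, 0, 0, 0, 0, 0, 0, 0, 0, 0, 0, 0, 0, 0, 0, 0, 0, 0, 0, 0, 0, 0, 0, 0, 0, 0, 0, 0, 0, 0, 0, 0, 0, 0, 0, 0, 0, 0, 0, 0, 0, 0, 0, 0, 0, 0, 0, 0, 0, 0, 0, 0, 0, 0, 0, 0, 0, 0, 0, 0, 0, 0, 0, 0, 0, 0, 0, 0, 0, 0, 0, 0, 0, 0, 0, 0, 0, 0, 0, 0, 0, 0, 0, 0, 0, 0, 0, 0, 0, 0, 0, 0, 0, 0, 0, 0, 0, 0, 0, 0, 0, 0, 0, 0, 0, 0, 0, 0, 0, 0, 0, 0, 0, 0, 0, 0, 0, 0, 0,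 0, 0, 0, 0, 0, 0, 0, 0, 0, 0, 0, 0, 0, 0, 0, 0, 0, 0, 0, 0, 0, 0, 0, 0, 0, 0, 0, 0, 0, 0, 0, 0, 0, 0, 0, 0, 0, 0, 0, 0, 0, 0, 0, 0, 0, 0, 0, 0, 0, 0, 0, 0, 0, 0, 0, 0, 0, 0, 0, 0, 0, 0, 0, 0, 0, 0, 0, 0, 0, 0, 0, 0, 0, 0, 0, 0, 0, 0, 0, 0, 0, 0, 0, 0, 0, 0, 0, 0, 0, 0, 0, 0, 0, 0, 0, 0, 0, 0, 0, 0, 0, 0, 0, 0, 0, 0, 0, 0, 0, 0, 0, 0, 0, 0, 0, 0, 0, 0, 0, 0, 0, 0, 0, 0, 0, 0, 0, 0, 0, 0, 0, 0, 0, 0, 0, 0, 0, 0, 0, 0, 0, 0, 0, 0, 0, 0, 0, 0, 0, 0, 0, 0, 0, 0, 0, 0, 0, 0, 0, 1, 0, 0, 0, 0, 1, 0, 0, 0, 0, 1, 1]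

-- remove_zeros: pop leading zeros while more than one element remains.
-- (On [] Python raises IndexError (a[0]); that input is outside Pre_ below.)
def rz : List Int → List Int
  | [] => []
  | [x] => [x]
  | x :: y :: l => if x = 0 then rz (y :: l) else x :: y :: l

-- the scan 'while i < len(a)-1 and a[i]==b[i]: i += 1' followed by the a[i] < b[i] test
def regLoop : List Int → List Int → Int
  | [x], [y] => if x < y then 0 else 1
  | x :: xs, y :: ys => if x = y then regLoop xs ys else if x < y then 0 else 1
  | _, _ => 1   -- unreachable: regulation only compares equal-length nonempty lists

def regulation (a b : List Int) : Int :=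
  let a := rz a
  let b := rz b
  if a.length = b.length then regLoop a b
  else if a.length < b.length then 0 else 1

-- Python's regulation trims a and b IN PLACE (remove_zeros pops); the padding loops then
-- see the trimmed lists, so we pad the trimmed lists.  The '[0] + b' prepend loop builds
-- exactly 'replicate (missing) 0 ++ b'.  (If the 'shorter' list were longer Python would
-- loop forever; mod_px_lst only ever calls this on equal-length operands.)
def addZeros (a b : List Int) : List Int × List Int :=
  let a' := rz a
  let b' := rz b
  if regulation a b = 1 then (a', List.replicate (a'.length - b'.length) 0 ++ b')
  else (List.replicate (b'.length - a'.length) 0 ++ a', b')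

-- (a[i] + b[i]) % 2, Python % = PySem.Int.mod
def add2 (x y : Int) : Int := PySem.Int.mod (x + y) 2

def gfAdd (a b : List Int) : List Int :=
  let p := addZeros a b
  rz (List.zipWith add2 p.1 p.2)

-- inner while of gf_mul: j walks br (= b reversed), skipping zeros, c[i+j] += 1; %= 2
def mulInner : Nat → List Int → Nat → List Int → List Int
  | _, [], _, c => c
  | i, b :: br, j, c =>
    if b = 0 then mulInner i br (j+1) c
    else mulInner i br (j+1) (c.set (i+j) (add2 (c.getD (i+j) 0) 1))

-- outer while of gf_mul: i walks ar (= a reversed), skipping zeros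
def mulOuter : List Int → Nat → List Int → List Int → List Int
  | [], _, _, c => c
  | a :: ar, i, br, c =>
    if a = 0 then mulOuter ar (i+1) br c
    else mulOuter ar (i+1) br (mulInner i br 0 c)

def gfMul (a b : List Int) : List Int :=
  rz (mulOuter a.reverse 0 b.reverse (List.replicate (max a.length b.length * 2) 0)).reverse

-- mod_px_lst's recursion, made total with a fuel guard only (fuel a.length + 2 is proved
-- sufficient: each level cancels the current leading bit).  Fuel 0 is never reached.
def modAux : Nat → List Int → List Int
  | 0, a => rz a
  | f+1, a =>
    let t := rz a
    if t.length < pxA.length then t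
    else
      let newLen := t.length - pxA.length + 1
      let b : List Int := 1 :: List.replicate (newLen - 1) 0
      rz (modAux f (gfAdd t (gfMul pxA b)))

def mod_px_lst (a : List Int) : List Int := modAux (a.length + 2) a

-- ===== PORT B =====
-- PX = (1 << 293) | (1 << 11) | (1 << 6) | (1 << 1) | 1  (the same polynomial, as one int)
def pxNat : Nat := 2 ^ 293 + 2 ^ 11 + 2 ^ 6 + 2 ^ 1 + 1

-- the packing loop 'n = 0; for x in t: n = n * 2 + x % 2'
def encB (t : List Int) : Nat := t.foldl (fun n x => 2 * n + (PySem.Int.mod x 2).toNat) 0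

-- the reduction loop 'while n.bit_length() >= 294: n ^= PX << (n.bit_length() - 294)'.
-- n.bit_length() is Nat.size; the fuel t.length is proved sufficient (each XOR strictly
-- lowers the bit length), so this is the same loop made total.
def reduB : Nat → Nat → Nat
  | 0, n => n
  | f+1, n => if Nat.size n < 294 then n else reduB f (n ^^^ (pxNat <<< (Nat.size n - 294)))

-- '[int(c) for c in bin(n)[2:]]': the binary digits of n, most significant first
def binB (n : Nat) : List Int :=
  if h : n = 0 then [] else binB (n / 2) ++ [((n % 2 : Nat) : Int)]
decreasing_by exact Nat.div_lt_self (Nat.pos_of_ne_zero h) one_lt_two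

def toBitsB (n : Nat) : List Int := if n = 0 then [0] else binB n

def mod_px_lst_alt (a : List Int) : List Int :=
  -- i = next((k for k, x in enumerate(a) if x != 0), None); if i is None: i = len(a)-1
  let i := (List.findIdx? (fun x => x != 0) a).getD (a.length - 1)
  let t := a.drop i
  if t.length < 294 then t
  else toBitsB (reduB t.length (encB t))

-- ===== PRECONDITION & SPEC =====
-- Pre_ excludes only the empty list, on which Python A raises IndexError (a[0] in remove_zeros).
def Pre_mod_px_lst (a : List Int) : Prop := a ≠ []
instance (a : List Int) : Decidable (Pre_mod_px_lst a) := by unfold Pre_mod_px_lst; infer_instance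
def pvWitness_mod_px_lst : List Int := [1, 0, 1]

def Spec_mod_px_lst (a : List Int) (out : List Int) : Prop := out = mod_px_lst_alt a
instance (a : List Int) (out : List Int) : Decidable (Spec_mod_px_lst a out) := by unfold Spec_mod_px_lst; infer_instance

-- ===== CLAIM (what is proved, stated in full; the proofs are below) =====
def Claim_equal_mod_px_lst : Prop := ∀ (a : List Int), Dom_mod_px_lst a → Pre_mod_px_lst a → Spec_mod_px_lst a (mod_px_lst a)

-- ===== LEMMAS AND PROOFS =====

-- ---- arithmetic on bits ----
def IsBits (l : List Int) : Prop := ∀ x ∈ l, x = 0 ∨ x = 1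

lemma mod2_emod (x : Int) : PySem.Int.mod x 2 = x % 2 := PySem.Int.mod_eq_emod_of_pos (by norm_num)

lemma add2_emod (x y : Int) : add2 x y = (x + y) % 2 := mod2_emod (x + y)

lemma add2_bit (x y : Int) : add2 x y = 0 ∨ add2 x y = 1 := by rw [add2_emod]; omega

lemma mod2_bit (x : Int) : PySem.Int.mod x 2 = 0 ∨ PySem.Int.mod x 2 = 1 := by
  rw [mod2_emod]; omega

lemma mod2_bit_id (x : Int) (h : x = 0 ∨ x = 1) : PySem.Int.mod x 2 = x := by rw [mod2_emod]; omega

lemma mod2_idem (x : Int) : PySem.Int.mod (PySem.Int.mod x 2) 2 = PySem.Int.mod x 2 :=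
  mod2_bit_id _ (mod2_bit x)

lemma bits_map_id {l : List Int} (h : IsBits l) : l.map (fun x => PySem.Int.mod x 2) = l := by
  induction l with
  | nil => rfl
  | cons x xs ih =>
    simp only [List.map_cons]
    rw [mod2_bit_id x (h x (by simp)), ih (fun y hy => h y (by simp [hy]))]

lemma zw_bits (a b : List Int) : IsBits (List.zipWith add2 a b) := by
  induction a generalizing b with
  | nil => intro x hx; simp at hx
  | cons x xs ih =>
    cases b with
    | nil => intro y hy; simp at hy
    | cons z zs =>
      intro y hy
      rcases List.mem_cons.mp hy with h | h
      · exact h ▸ add2_bit x z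
      · exact ih zs y h

lemma zw_take (f : Int → Int → Int) (l b : List Int) :
    List.zipWith f (l.take b.length) b = List.zipWith f l b := by
  induction l generalizing b with
  | nil => simp
  | cons x xs ih => cases b with
    | nil => simp
    | cons y ys => simp [ih]

-- ---- remove_zeros / trim ----
lemma rz_ne_nil : ∀ {l : List Int}, l ≠ [] → rz l ≠ [] := by
  intro l
  induction l using rz.induct with
  | case1 => intro h; exact absurd rfl h
  | case2 x => intro _; simp [rz]
  | case3 y l ih => intro _; simpa [rz] using ih (by simp)
  | case4 x y l hx => intro _; simp [rz, hx]

lemma rz_length_le (l : List Int) : (rz l).length ≤ l.length := by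
  induction l using rz.induct with
  | case1 => simp [rz]
  | case2 x => simp [rz]
  | case3 y l ih =>
    show (rz (y :: l)).length ≤ l.length + 1 + 1
    exact Nat.le_succ_of_le (by simpa using ih)
  | case4 x y l hx => simp [rz, hx]

lemma rz_cons0 {l : List Int} (h : l ≠ []) : rz (0 :: l) = rz l := by
  cases l with
  | nil => exact absurd rfl h
  | cons y m => simp [rz]

lemma rz_cons_ne (x y : Int) (l : List Int) (hx : x ≠ 0) : rz (x :: y :: l) = x :: y :: l := by
  simp [rz, hx]

lemma rz_idem (l : List Int) : rz (rz l) = rz l := by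
  induction l using rz.induct with
  | case1 => rfl
  | case2 x => rfl
  | case3 y l ih => simpa [rz] using ih
  | case4 x y l hx => simp [rz, hx]

lemma rz_repl (j : Nat) (l : List Int) (h : l ≠ []) :
    rz (List.replicate j 0 ++ l) = rz l := by
  induction j with
  | zero => simp
  | succ n ih =>
    rw [List.replicate_succ, List.cons_append, rz_cons0 (by simp [h]), ih]

lemma rz_subset {l : List Int} : ∀ x ∈ rz l, x ∈ l := by
  induction l using rz.induct with
  | case1 => simp [rz]
  | case2 x => simp [rz]
  | case3 y l ih =>
    intro z hz
    rw [show rz (0 :: y :: l) = rz (y :: l) by simp [rz]] at hz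
    exact List.mem_cons_of_mem 0 (ih z hz)
  | case4 x y l hx => simp [rz, hx]

lemma trimmed_head {x : Int} {l : List Int} (hl : l ≠ []) (h : rz (x :: l) = x :: l) : x ≠ 0 := by
  cases l with
  | nil => exact absurd rfl hl
  | cons y m =>
    intro hx
    subst hx
    rw [rz_cons0 (by simp)] at h
    have h2 := rz_length_le (y :: m)
    rw [h] at h2
    simp at h2

-- ---- the fixed polynomial ----
set_option maxRecDepth 200000
lemma pxA_len : pxA.length = 294 := rfl
lemma pxA_cons2 : pxA = 1 :: 0 :: pxA.drop 2 := rfl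
lemma pxA_cons : pxA = 1 :: pxA.drop 1 := rfl
lemma pxA_drop1_len : (pxA.drop 1).length = 293 := rfl
lemma pxA_bits : IsBits pxA := by unfold IsBits; decide

lemma bits_getD {l : List Int} (h : IsBits l) (q : Nat) : l.getD q 0 = 0 ∨ l.getD q 0 = 1 := by
  by_cases hq : q < l.length
  · rw [List.getD_eq_getElem l 0 hq]
    exact h _ (List.getElem_mem hq)
  · rw [List.getD_eq_default l 0 (by omega)]
    exact Or.inl rfl

-- ---- getD toolkit ----
lemma getD_set_ne (l : List Int) (n p : Nat) (v : Int) (h : n ≠ p) :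
    (l.set n v).getD p 0 = l.getD p 0 := by
  simp [List.getD_eq_getElem?_getD, List.getElem?_set_ne h]

lemma getD_set_self (l : List Int) (n : Nat) (v : Int) (h : n < l.length) :
    (l.set n v).getD n 0 = v := by
  simp [List.getD_eq_getElem?_getD, h]

lemma getD_repl (n p : Nat) : (List.replicate n (0:Int)).getD p 0 = 0 := by
  by_cases h : p < n
  · exact List.getD_replicate 0 h
  · exact List.getD_eq_default _ 0 (by simp; omega)

lemma eq_of_getD : ∀ (a b : List Int), a.length = b.length →
    (∀ p, a.getD p 0 = b.getD p 0) → a = b := by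
  intro a
  induction a with
  | nil =>
    intro b h _
    cases b with
    | nil => rfl
    | cons z zs => simp at h
  | cons x xs ih =>
    intro b h hp
    cases b with
    | nil => simp at h
    | cons y ys =>
      have h0 := hp 0
      simp only [List.getD_cons_zero] at h0
      subst h0
      have := ih ys (by simpa using h) (fun p => by simpa using hp (p+1))
      rw [this]

-- ---- gf_mul on px * x^(k-1) ----
lemma mulInner_spec : ∀ (t : Nat) (c : List Int) (i j : Nat),
    mulInner i (List.replicate t 0 ++ [1]) j c
      = c.set (i+j+t) (add2 (c.getD (i+j+t) 0) 1) := by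
  intro t
  induction t with
  | zero => intro c i j; simp [mulInner]
  | succ n ih =>
    intro c i j
    rw [List.replicate_succ, List.cons_append]
    show mulInner i (List.replicate n 0 ++ [1]) (j+1) c = _
    rw [ih c i (j+1), show i+(j+1)+n = i+j+(n+1) from by omega]

lemma mulOuter_spec : ∀ (ar : List Int) (i : Nat) (c : List Int) (off : Nat),
    i + off + ar.length ≤ c.length →
    (mulOuter ar i (List.replicate off 0 ++ [1]) c).length = c.length ∧
    ∀ p, (mulOuter ar i (List.replicate off 0 ++ [1]) c).getD p 0 =
      if i + off ≤ p ∧ p < i + off + ar.length ∧ ar.getD (p - (i + off)) 0 ≠ 0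
      then add2 (c.getD p 0) 1 else c.getD p 0 := by
  intro ar
  induction ar with
  | nil =>
    intro i c off _
    refine ⟨rfl, fun p => ?_⟩
    rw [if_neg (by rintro ⟨h1, h2, h3⟩; simp only [List.length_nil, Nat.add_zero] at h2; omega)]
    rfl
  | cons a ar ih =>
    intro i c off hlen
    simp only [List.length_cons] at hlen
    rw [mulOuter]
    by_cases ha : a = 0
    · rw [if_pos ha]
      obtain ⟨ihl, ihg⟩ := ih (i+1) c off (by omega)
      refine ⟨ihl, fun p => ?_⟩
      rw [ihg p]
      by_cases hp : (i+1) + off ≤ p ∧ p < (i+1) + off + ar.length ∧ ar.getD (p - ((i+1) + off)) 0 ≠ 0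
      · obtain ⟨hp1, hp2, hp3⟩ := hp
        rw [if_pos ⟨hp1, hp2, hp3⟩, if_pos ?_]
        refine ⟨by omega, by simp only [List.length_cons]; omega, ?_⟩
        rw [show p - (i + off) = (p - ((i+1) + off)) + 1 from by omega, List.getD_cons_succ]
        exact hp3
      · rw [if_neg hp, if_neg ?_]
        rintro ⟨hq1, hq2, hq3⟩
        rcases Nat.eq_or_lt_of_le hq1 with he | hlt
        · rw [show p - (i + off) = 0 from by omega, List.getD_cons_zero] at hq3
          exact hq3 ha
        · refine hp ⟨by omega, by simp only [List.length_cons] at hq2; omega, ?_⟩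
          rw [show p - (i + off) = (p - ((i+1) + off)) + 1 from by omega, List.getD_cons_succ] at hq3
          exact hq3
    · rw [if_neg ha]
      have hmi : mulInner i (List.replicate off 0 ++ [1]) 0 c
          = c.set (i + off) (add2 (c.getD (i + off) 0) 1) := by
        rw [mulInner_spec off c i 0, show i + 0 + off = i + off from by omega]
      have hlen' : (mulInner i (List.replicate off 0 ++ [1]) 0 c).length = c.length := by
        rw [hmi]; simp
      obtain ⟨ihl, ihg⟩ := ih (i+1) (mulInner i (List.replicate off 0 ++ [1]) 0 c) off (by omega)
      refine ⟨by rw [ihl, hlen'], fun p => ?_⟩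
      rw [ihg p]
      by_cases hp : (i+1) + off ≤ p ∧ p < (i+1) + off + ar.length ∧ ar.getD (p - ((i+1) + off)) 0 ≠ 0
      · obtain ⟨hp1, hp2, hp3⟩ := hp
        rw [if_pos ⟨hp1, hp2, hp3⟩, hmi, getD_set_ne _ _ _ _ (by omega), if_pos ?_]
        refine ⟨by omega, by simp only [List.length_cons]; omega, ?_⟩
        rw [show p - (i + off) = (p - ((i+1) + off)) + 1 from by omega, List.getD_cons_succ]
        exact hp3
      · rw [if_neg hp, hmi]
        by_cases hq : p = i + off
        · subst hq
          rw [getD_set_self _ _ _ (by omega), if_pos ?_]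
          refine ⟨le_refl _, by simp only [List.length_cons]; omega, ?_⟩
          rw [show i + off - (i + off) = 0 from by omega, List.getD_cons_zero]
          exact ha
        · rw [getD_set_ne _ _ _ _ (by omega), if_neg ?_]
          rintro ⟨hq1, hq2, hq3⟩
          refine hp ⟨by omega, by simp only [List.length_cons] at hq2; omega, ?_⟩
          rw [show p - (i + off) = (p - ((i+1) + off)) + 1 from by omega, List.getD_cons_succ] at hq3
          exact hq3

lemma pxA_rev_bits : IsBits pxA.reverse := fun x hx => pxA_bits x (List.mem_reverse.mp hx)

lemma gfMul_px (k : Nat) (hk : 1 ≤ k) :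
    gfMul pxA (1 :: List.replicate (k-1) 0) = pxA ++ List.replicate (k-1) 0 := by
  unfold gfMul
  rw [show (1 :: List.replicate (k-1) 0 : List Int).reverse = List.replicate (k-1) 0 ++ [1] from by simp,
    show (1 :: List.replicate (k-1) 0 : List Int).length = k from by simp; omega, pxA_len]
  set L := max 294 k * 2 with hLdef
  have harl : (pxA.reverse).length = 294 := by simp [pxA_len]
  obtain ⟨hlen, hget⟩ := mulOuter_spec pxA.reverse 0 (List.replicate L 0) (k-1)
    (by simp [harl]; omega)
  have hlen1 : (List.replicate (k-1) (0:Int) ++ pxA.reverse).length = (k-1) + 294 := by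
    simp [harl]
  have hc : mulOuter pxA.reverse 0 (List.replicate (k-1) 0 ++ [1]) (List.replicate L 0)
      = List.replicate (k-1) 0 ++ pxA.reverse ++ List.replicate (L - (k-1) - 294) 0 := by
    apply eq_of_getD
    · rw [hlen]; simp [harl]; omega
    · intro p
      rw [hget p]
      by_cases h1 : p < k - 1
      · rw [if_neg (by rintro ⟨ha, hb, hc⟩; omega),
          List.getD_append _ _ _ _ (by rw [hlen1]; omega),
          List.getD_append _ _ _ _ (by simp; omega)]
        rw [getD_repl, getD_repl]
      · by_cases h2 : p < (k - 1) + 294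
        · rw [List.getD_append _ _ _ _ (by rw [hlen1]; omega),
            List.getD_append_right _ _ _ _ (by simp; omega)]
          simp only [List.length_replicate]
          by_cases h3 : pxA.reverse.getD (p - (k-1)) 0 = 0
          · rw [if_neg (by rintro ⟨ha, hb, hc⟩; rw [show p - (0 + (k-1)) = p - (k-1) from by omega] at hc; exact hc h3),
              getD_repl, h3]
          · rw [if_pos ⟨by omega, by rw [harl]; omega, by rw [show p - (0 + (k-1)) = p - (k-1) from by omega]; exact h3⟩,
              getD_repl]
            rcases bits_getD pxA_rev_bits (p - (k-1)) with h0 | h1'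
            · exact absurd h0 h3
            · rw [h1']; decide
        · rw [if_neg (by rintro ⟨ha, hb, hc⟩; rw [harl] at hb; omega),
            List.getD_append_right _ _ _ _ (by rw [hlen1]; omega),
            getD_repl, getD_repl]
  rw [hc]
  have hrev : (List.replicate (k-1) (0:Int) ++ pxA.reverse ++ List.replicate (L - (k-1) - 294) 0).reverse
      = List.replicate (L - (k-1) - 294) 0 ++ (pxA ++ List.replicate (k-1) 0) := by
    simp [List.reverse_append]
  rw [hrev, rz_repl _ _ (by rw [pxA_cons]; simp)]
  have hsplit : pxA ++ List.replicate (k-1) 0 = 1 :: 0 :: (pxA.drop 2 ++ List.replicate (k-1) 0) := by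
    rw [pxA_cons2]; simp
  rw [hsplit, rz_cons_ne _ _ _ one_ne_zero, ← hsplit]

-- ---- gf_add on equal-length trimmed operands ----
lemma gfAdd_eq (a b : List Int) (ha : rz a = a) (hb : rz b = b) (h : a.length = b.length) :
    gfAdd a b = rz (List.zipWith add2 a b) := by
  unfold gfAdd addZeros
  simp only [ha, hb, h]
  split <;> simp [h, Nat.sub_self]

-- ---- modAux unfolding ----
lemma modAux_succ (f : Nat) (a : List Int) : modAux (f+1) a =
    if (rz a).length < 294 then rz a
    else rz (modAux f (gfAdd (rz a) (gfMul pxA (1 :: List.replicate ((rz a).length - 294) 0)))) := by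
  show (if (rz a).length < pxA.length then rz a
    else rz (modAux f (gfAdd (rz a)
      (gfMul pxA (1 :: List.replicate ((rz a).length - pxA.length + 1 - 1) 0))))) = _
  rw [pxA_len]
  rcases Nat.lt_or_ge (rz a).length 294 with h | h
  · rw [if_pos h, if_pos h]
  · rw [if_neg (by omega), if_neg (by omega),
      show (rz a).length - 294 + 1 - 1 = (rz a).length - 294 from by omega]

-- ---- dloop: A's reduction recursion rephrased as one left-to-right sweep (proof device) ----
def dloop (px : List Int) : List Int → List Int
  | [] => []
  | x :: xs =>
    if xs.length + 1 < px.length then x :: xs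
    else if x = 1 then 0 :: dloop px (List.zipWith add2 xs (px.drop 1) ++ xs.drop (px.length - 1))
    else x :: dloop px xs
termination_by l => l.length
decreasing_by
  · simp [List.length_zipWith, List.length_drop]
    omega
  · simp

lemma dloop_ne_nil {l : List Int} (h : l ≠ []) : dloop pxA l ≠ [] := by
  cases l with
  | nil => exact absurd rfl h
  | cons x xs =>
    rw [dloop]
    split
    · simp
    · split <;> simp

lemma dloop_short {l : List Int} (h : l.length < 294) : dloop pxA l = l := by
  cases l with
  | nil => rw [dloop]
  | cons x xs => rw [dloop, if_pos (by rw [pxA_len]; simpa using h)]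

lemma dloop_cons_one {xs : List Int} (h : 293 ≤ xs.length) :
    dloop pxA (1 :: xs) = 0 :: dloop pxA (List.zipWith add2 xs (pxA.drop 1) ++ xs.drop 293) := by
  rw [dloop, if_neg (by rw [pxA_len]; omega), if_pos rfl, pxA_len]

lemma dloop_cons_ne {x : Int} {xs : List Int} (h : 293 ≤ xs.length) (hx : x ≠ 1) :
    dloop pxA (x :: xs) = x :: dloop pxA xs := by
  rw [dloop, if_neg (by rw [pxA_len]; omega), if_neg hx]

lemma rz_dloop_cons0 {v : List Int} (h : v ≠ []) : rz (dloop pxA (0 :: v)) = rz (dloop pxA v) := by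
  by_cases hl : v.length < 293
  · rw [dloop_short (by simp; omega), dloop_short (by omega), rz_cons0 h]
  · rw [dloop_cons_ne (by omega) (by norm_num), rz_cons0 (dloop_ne_nil h)]

lemma rz_dloop_rz : ∀ v : List Int, v ≠ [] → rz (dloop pxA v) = rz (dloop pxA (rz v)) := by
  intro v
  induction v using rz.induct with
  | case1 => intro h; exact absurd rfl h
  | case2 x => intro _; rfl
  | case3 y l ih =>
    intro _
    rw [rz_dloop_cons0 (by simp), ih (by simp), rz_cons0 (l := y :: l) (by simp)]
  | case4 x y l hx => intro _; rw [rz_cons_ne x y l hx]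

-- ---- A's value as the sweep over the mod-2 image (proof device) ----
def Bcore (t : List Int) : List Int :=
  if t.length < 294 then t else rz (dloop pxA (t.map (fun x => PySem.Int.mod x 2)))

-- splitting the shifted divisor under zipWith
lemma udecomp (t' : List Int) (h : 293 ≤ t'.length) :
    List.zipWith add2 t' (pxA.drop 1 ++ List.replicate (t'.length - 293) 0)
      = List.zipWith add2 t' (pxA.drop 1) ++ (t'.drop 293).map (fun x => PySem.Int.mod x 2) := by
  conv_lhs => rw [← List.take_append_drop 293 t']
  rw [List.zipWith_append (by rw [pxA_drop1_len]; simp [List.length_take]; omega)]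
  congr 1
  · rw [show (293:Nat) = (pxA.drop 1).length from pxA_drop1_len.symm, zw_take]
  · have : (t'.drop 293).map (fun x => PySem.Int.mod x 2)
        = List.zipWith add2 (t'.drop 293) (List.replicate (t'.drop 293).length 0) := by
      clear h
      induction t'.drop 293 with
      | nil => rfl
      | cons x xs ih =>
        simp only [List.map_cons, List.length_cons, List.replicate_succ, List.zipWith_cons_cons, ih]
        congr 1
        rw [add2_emod, mod2_emod]
        omega
    rw [this]
    congr 1
    simp

lemma bits_P {n : Nat} : IsBits (pxA.drop 1 ++ List.replicate n 0) := by
  intro x hx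
  rcases List.mem_append.mp hx with h | h
  · exact pxA_bits x (List.drop_subset _ _ h)
  · exact Or.inl (List.eq_of_mem_replicate h)

-- A's gf_mul / gf_add step on a trimmed list h :: t' of length n ≥ 294, as one zipWith
lemma step_shape (h : Int) (t' : List Int) (n : Nat)
    (hn : (h :: t').length = n) (hs : 294 ≤ n) (htrz : rz (h :: t') = h :: t') :
    gfAdd (h :: t') (gfMul pxA (1 :: List.replicate (n - 294) 0))
      = rz (add2 h 1 :: List.zipWith add2 t' (pxA.drop 1 ++ List.replicate (n - 294) 0)) := by
  have hmul := gfMul_px (n - 293) (by omega)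
  rw [show n - 293 - 1 = n - 294 from by omega] at hmul
  have hcrz : rz (pxA ++ List.replicate (n - 294) 0) = pxA ++ List.replicate (n - 294) 0 := by
    rw [pxA_cons2]
    exact rz_cons_ne _ _ _ one_ne_zero
  rw [hmul, gfAdd_eq _ _ htrz hcrz (by simp [pxA_len] at hn ⊢; omega)]
  conv_lhs => rw [pxA_cons, List.cons_append, List.zipWith_cons_cons]

-- xoring the divisor twice restores the plain bits of t' (even-head case of A's recursion)
lemma add2_invol (x y : Int) (hy : y = 0 ∨ y = 1) : add2 (add2 x y) y = PySem.Int.mod x 2 := by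
  rw [add2_emod, add2_emod, mod2_emod]; omega

lemma zw_invol (t P : List Int) (hP : IsBits P) (hl : P.length = t.length) :
    List.zipWith add2 (List.zipWith add2 t P) P = t.map (fun x => PySem.Int.mod x 2) := by
  induction t generalizing P with
  | nil => cases P with
    | nil => rfl
    | cons y ys => simp at hl
  | cons x xs ih =>
    cases P with
    | nil => simp at hl
    | cons y ys =>
      simp only [List.zipWith_cons_cons, List.map_cons]
      rw [add2_invol x y (hP y (by simp)), ih ys (fun z hz => hP z (by simp [hz])) (by simpa using hl)]

lemma zw_map_left (a b : List Int) :
    List.zipWith add2 (a.map (fun x => PySem.Int.mod x 2)) b = List.zipWith add2 a b := by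
  induction a generalizing b with
  | nil => rfl
  | cons x xs ih => cases b with
    | nil => rfl
    | cons z zs =>
      simp only [List.map_cons, List.zipWith_cons_cons, ih]
      congr 1
      rw [add2_emod, add2_emod, mod2_emod]
      omega

lemma dloop_map_step (h : Int) (t' : List Int) (hl : 293 ≤ t'.length)
    (hmod : PySem.Int.mod h 2 = 1) :
    dloop pxA ((h :: t').map (fun x => PySem.Int.mod x 2))
      = 0 :: dloop pxA (List.zipWith add2 t' (pxA.drop 1 ++ List.replicate (t'.length - 293) 0)) := by
  rw [List.map_cons, hmod, dloop_cons_one (by simpa using hl), zw_map_left,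
    show (t'.map fun x => PySem.Int.mod x 2).drop 293
      = (t'.drop 293).map (fun x => PySem.Int.mod x 2) from (List.map_drop).symm,
    ← udecomp t' hl]

lemma dloop_one_invol (t' : List Int) (hl : 293 ≤ t'.length) :
    dloop pxA (1 :: List.zipWith add2 t' (pxA.drop 1 ++ List.replicate (t'.length - 293) 0))
      = 0 :: dloop pxA (t'.map (fun x => PySem.Int.mod x 2)) := by
  have hPlen : (pxA.drop 1 ++ List.replicate (t'.length - 293) 0).length = t'.length := by
    rw [List.length_append, List.length_replicate, pxA_drop1_len]; omega
  have hu'len : (List.zipWith add2 t' (pxA.drop 1 ++ List.replicate (t'.length - 293) 0)).length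
      = t'.length := by rw [List.length_zipWith, hPlen]; omega
  set u' := List.zipWith add2 t' (pxA.drop 1 ++ List.replicate (t'.length - 293) 0) with hu'
  have hbits : IsBits u' := hu' ▸ zw_bits _ _
  rw [dloop_cons_one (by omega)]
  have h1 : (u'.drop 293).map (fun x => PySem.Int.mod x 2) = u'.drop 293 :=
    bits_map_id (fun x hx => hbits x (List.drop_subset _ _ hx))
  have h2 := udecomp u' (by omega)
  rw [hu'len] at h2
  rw [← h1, ← h2, hu', zw_invol t' _ bits_P hPlen]

-- glue: Bcore on a trimmed bit list is the sweep itself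
lemma glue (v : List Int) (hbits : IsBits v) :
    rz (Bcore (rz v)) = rz (dloop pxA (rz v)) := by
  have hvbits : IsBits (rz v) := fun x hx => hbits x (rz_subset x hx)
  by_cases h294 : (rz v).length < 294
  · rw [show Bcore (rz v) = rz v from by rw [Bcore, if_pos h294], dloop_short h294]
  · rw [show Bcore (rz v) = rz (dloop pxA (rz v)) from by
      rw [Bcore, if_neg h294, bits_map_id hvbits], rz_idem]

lemma main_bits : ∀ (f : Nat) (a : List Int), a ≠ [] → IsBits a → (rz a).length + 1 ≤ f →
    modAux f a = Bcore (rz a) := by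
  intro f
  induction f with
  | zero =>
    intro a ha _ hf
    cases hrz : rz a with
    | nil => exact absurd hrz (rz_ne_nil ha)
    | cons x l => rw [hrz] at hf; simp at hf
  | succ f ih =>
    intro a ha hb hf
    rw [modAux_succ]
    by_cases hs : (rz a).length < 294
    · rw [if_pos hs, Bcore, if_pos hs]
    · rw [if_neg hs]
      have htrz : rz (rz a) = rz a := rz_idem a
      have htbits : IsBits (rz a) := fun x hx => hb x (rz_subset x hx)
      obtain ⟨h, t', ht⟩ : ∃ h t', rz a = h :: t' := by
        cases hrz : rz a with
        | nil => rw [hrz] at hs; simp at hs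
        | cons h t' => exact ⟨h, t', rfl⟩
      have hn : (h :: t').length = (rz a).length := by rw [ht]
      have ht'len : t'.length = (rz a).length - 1 := by simp at hn; omega
      have ht'ne : t' ≠ [] := by
        intro h0; rw [h0] at ht'len; simp at ht'len; omega
      have hhead : h ≠ 0 := trimmed_head ht'ne (ht ▸ htrz)
      have hh1 : h = 1 := by
        rcases htbits h (by rw [ht]; simp) with h0 | h1
        · exact absurd h0 hhead
        · exact h1
      have hmod : PySem.Int.mod h 2 = 1 := by rw [hh1]; decide
      have hstep := step_shape h t' (rz a).length hn (by omega) (ht ▸ htrz)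
      rw [show add2 h 1 = 0 from by rw [add2_emod] at *; rw [mod2_emod] at hmod; omega] at hstep
      set u' := List.zipWith add2 t' (pxA.drop 1 ++ List.replicate ((rz a).length - 294) 0) with hu'
      have hu'len : u'.length = (rz a).length - 1 := by
        rw [hu', List.length_zipWith, List.length_append, List.length_replicate,
          pxA_drop1_len]
        omega
      have hu'ne : u' ≠ [] := by
        intro h0; rw [h0] at hu'len; simp at hu'len; omega
      have hu'bits : IsBits u' := hu' ▸ zw_bits _ _
      rw [← ht] at hstep
      rw [hstep, rz_cons0 hu'ne]
      have hrec := ih (rz u') (rz_ne_nil hu'ne) (fun x hx => hu'bits x (rz_subset x hx))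
        (by have h1 := rz_length_le u'; have h2 := congrArg List.length (rz_idem u'); omega)
      rw [rz_idem] at hrec
      rw [hrec]
      have hB : Bcore (rz a) = rz (dloop pxA (rz u')) := by
        rw [Bcore, if_neg hs, ht, dloop_map_step h t' (by omega) hmod,
          show t'.length - 293 = (rz a).length - 294 from by omega, ← hu',
          rz_cons0 (dloop_ne_nil hu'ne), rz_dloop_rz u' hu'ne]
      rw [hB]
      exact glue u' hu'bits

lemma main_all : ∀ (f : Nat) (a : List Int), a ≠ [] → (rz a).length + 2 ≤ f →
    modAux f a = Bcore (rz a) := by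
  intro f a ha hf
  obtain ⟨f, rfl⟩ : ∃ f', f = f' + 1 := by
    cases f with
    | zero => omega
    | succ f => exact ⟨f, rfl⟩
  rw [modAux_succ]
  by_cases hs : (rz a).length < 294
  · rw [if_pos hs, Bcore, if_pos hs]
  · rw [if_neg hs]
    have htrz : rz (rz a) = rz a := rz_idem a
    obtain ⟨h, t', ht⟩ : ∃ h t', rz a = h :: t' := by
      cases hrz : rz a with
      | nil => rw [hrz] at hs; simp at hs
      | cons h t' => exact ⟨h, t', rfl⟩
    have hn : (h :: t').length = (rz a).length := by rw [ht]
    have ht'len : t'.length = (rz a).length - 1 := by simp at hn; omega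
    have ht'ne : t' ≠ [] := by
      intro h0; rw [h0] at ht'len; simp at ht'len; omega
    have hhead : h ≠ 0 := trimmed_head ht'ne (ht ▸ htrz)
    have hstep := step_shape h t' (rz a).length hn (by omega) (ht ▸ htrz)
    set u' := List.zipWith add2 t' (pxA.drop 1 ++ List.replicate ((rz a).length - 294) 0) with hu'
    have hu'len : u'.length = (rz a).length - 1 := by
      rw [hu', List.length_zipWith, List.length_append, List.length_replicate,
        pxA_drop1_len]
      omega
    have hu'ne : u' ≠ [] := by
      intro h0; rw [h0] at hu'len; simp at hu'len; omega
    have hu'bits : IsBits u' := hu' ▸ zw_bits _ _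
    have hmap'len : (t'.map (fun x => PySem.Int.mod x 2)).length = (rz a).length - 1 := by
      rw [List.length_map]; omega
    rcases add2_bit h 1 with hA0 | hA1
    · have hmod : PySem.Int.mod h 2 = 1 := by
        rw [add2_emod] at hA0; rw [mod2_emod]; omega
      rw [← ht] at hstep
      rw [hstep, hA0, rz_cons0 hu'ne]
      have hrec := main_bits f (rz u') (rz_ne_nil hu'ne)
        (fun x hx => hu'bits x (rz_subset x hx))
        (by have h1 := rz_length_le u'; have h2 := congrArg List.length (rz_idem u'); omega)
      rw [rz_idem] at hrec
      rw [hrec]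
      have hB : Bcore (rz a) = rz (dloop pxA (rz u')) := by
        rw [Bcore, if_neg hs, ht, dloop_map_step h t' (by omega) hmod,
          show t'.length - 293 = (rz a).length - 294 from by omega, ← hu',
          rz_cons0 (dloop_ne_nil hu'ne), rz_dloop_rz u' hu'ne]
      rw [hB]
      exact glue u' hu'bits
    · have hmod : PySem.Int.mod h 2 = 0 := by
        rw [add2_emod] at hA1; rw [mod2_emod]; omega
      obtain ⟨u0, us, hus⟩ : ∃ u0 us, u' = u0 :: us := by
        cases hu : u' with
        | nil => exact absurd hu hu'ne
        | cons u0 us => exact ⟨u0, us, rfl⟩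
      have hrzu : rz (1 :: u') = 1 :: u' := by
        rw [hus]; exact rz_cons_ne _ _ _ one_ne_zero
      rw [← ht] at hstep
      rw [hstep, hA1]
      have hrec := main_bits f (1 :: u') (by simp)
        (by intro x hx
            rcases List.mem_cons.mp hx with h0 | h0
            · exact Or.inr h0
            · exact hu'bits x h0)
        (by rw [hrzu]; simp; omega)
      rw [hrzu, hrec, hrzu]
      have hbits1 : IsBits (1 :: u') := by
        intro x hx
        rcases List.mem_cons.mp hx with h0 | h0
        · exact Or.inr h0
        · exact hu'bits x h0
      have hdl : dloop pxA (1 :: u') = 0 :: dloop pxA (t'.map (fun x => PySem.Int.mod x 2)) := by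
        have := dloop_one_invol t' (by omega)
        rw [show t'.length - 293 = (rz a).length - 294 from by omega, ← hu'] at this
        exact this
      have hmapne : t'.map (fun x => PySem.Int.mod x 2) ≠ [] := by
        intro h0; rw [h0] at hmap'len; simp at hmap'len; omega
      have hBc : Bcore (1 :: u') = rz (dloop pxA (t'.map (fun x => PySem.Int.mod x 2))) := by
        rw [Bcore, if_neg (by simp; omega), bits_map_id hbits1, hdl,
          rz_cons0 (dloop_ne_nil hmapne)]
      rw [hBc, rz_idem]
      rw [Bcore, if_neg hs, ht, List.map_cons, hmod,
        dloop_cons_ne (by omega) (by norm_num),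
        rz_cons0 (dloop_ne_nil hmapne)]

-- ==================================================================================
-- Bridge: the list sweep (dloop) computes exactly B's integer reduction
-- ==================================================================================

-- ---- the packing fold ----
lemma enc_go (l : List Int) : ∀ c : Nat,
    l.foldl (fun n x => 2 * n + (PySem.Int.mod x 2).toNat) c = c * 2 ^ l.length + encB l := by
  induction l with
  | nil => intro c; simp [encB]
  | cons x xs ih =>
    intro c
    have hx : encB (x :: xs)
        = ((PySem.Int.mod x 2).toNat) * 2 ^ xs.length + encB xs := by
      show (x :: xs).foldl (fun n x => 2 * n + (PySem.Int.mod x 2).toNat) 0 = _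
      rw [List.foldl_cons, ih]
      ring_nf
    rw [List.foldl_cons, ih, hx, List.length_cons, pow_succ]
    ring

lemma enc_cons (x : Int) (xs : List Int) :
    encB (x :: xs) = (PySem.Int.mod x 2).toNat * 2 ^ xs.length + encB xs := by
  show (x :: xs).foldl _ 0 = _
  rw [List.foldl_cons, enc_go]
  ring_nf

lemma enc_append (u v : List Int) : encB (u ++ v) = encB u * 2 ^ v.length + encB v := by
  show (u ++ v).foldl _ 0 = _
  rw [List.foldl_append, enc_go]
  rfl

lemma mod2_toNat_le (x : Int) : (PySem.Int.mod x 2).toNat ≤ 1 := by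
  rcases mod2_bit x with h | h <;> rw [h] <;> decide

lemma enc_lt (l : List Int) : encB l < 2 ^ l.length := by
  induction l with
  | nil => simp [encB]
  | cons x xs ih =>
    rw [enc_cons]
    have := mod2_toNat_le x
    have h2 : (2:Nat) ^ (x :: xs).length = 2 ^ xs.length + 2 ^ xs.length := by
      simp [List.length_cons, pow_succ]
      ring
    rw [h2]
    have : (PySem.Int.mod x 2).toNat * 2 ^ xs.length ≤ 2 ^ xs.length :=
      by calc (PySem.Int.mod x 2).toNat * 2 ^ xs.length ≤ 1 * 2 ^ xs.length :=
                Nat.mul_le_mul_right _ (mod2_toNat_le x)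
        _ = 2 ^ xs.length := one_mul _
    omega

lemma enc_map_mod2 (l : List Int) : encB (l.map (fun x => PySem.Int.mod x 2)) = encB l := by
  show (l.map _).foldl _ 0 = l.foldl _ 0
  rw [List.foldl_map]
  congr 1
  funext n x
  rw [mod2_idem]

lemma enc_repl0 (s : Nat) : encB (List.replicate s 0) = 0 := by
  induction s with
  | zero => simp [encB]
  | succ n ih => rw [List.replicate_succ, enc_cons, ih]; simp

-- ---- xor arithmetic ----
lemma xor_add_pow (a b k e f : Nat) (ha : a ≤ 1) (hb : b ≤ 1) (he : e < 2 ^ k) (hf : f < 2 ^ k) :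
    (a * 2 ^ k + e) ^^^ (b * 2 ^ k + f) = (a ^^^ b) * 2 ^ k + (e ^^^ f) := by
  have hef : e ^^^ f < 2 ^ k := Nat.xor_lt_two_pow he hf
  apply Nat.eq_of_testBit_eq
  intro i
  rw [Nat.testBit_xor,
    show a * 2 ^ k + e = 2 ^ k * a + e from by ring_nf,
    show b * 2 ^ k + f = 2 ^ k * b + f from by ring_nf,
    show (a ^^^ b) * 2 ^ k + (e ^^^ f) = 2 ^ k * (a ^^^ b) + (e ^^^ f) from by ring_nf,
    Nat.testBit_two_pow_mul_add _ he, Nat.testBit_two_pow_mul_add _ hf,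
    Nat.testBit_two_pow_mul_add _ hef]
  by_cases h : i < k
  · simp [h, Nat.testBit_xor]
  · simp [h, Nat.testBit_xor]

lemma bit_toNat_xor (x y : Int) (hx : x = 0 ∨ x = 1) (hy : y = 0 ∨ y = 1) :
    (PySem.Int.mod (add2 x y) 2).toNat = (PySem.Int.mod x 2).toNat ^^^ (PySem.Int.mod y 2).toNat := by
  rcases hx with h | h <;> rcases hy with h' | h' <;> subst h <;> subst h' <;> decide

lemma enc_zipWith (u v : List Int) (hu : IsBits u) (hv : IsBits v) (hl : u.length = v.length) :
    encB (List.zipWith add2 u v) = encB u ^^^ encB v := by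
  induction u generalizing v with
  | nil =>
    cases v with
    | nil => simp [encB]
    | cons y ys => simp at hl
  | cons x xs ih =>
    cases v with
    | nil => simp at hl
    | cons y ys =>
      rw [List.zipWith_cons_cons, enc_cons, enc_cons, enc_cons,
        List.length_zipWith, show min xs.length ys.length = xs.length from by
          simp at hl; omega,
        ih ys (fun z hz => hu z (by simp [hz])) (fun z hz => hv z (by simp [hz]))
          (by simpa using hl),
        bit_toNat_xor x y (hu x (by simp)) (hv y (by simp)),
        show ys.length = xs.length from by simpa using hl.symm]
      exact (xor_add_pow _ _ _ _ _ (mod2_toNat_le x) (mod2_toNat_le y)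
        (enc_lt xs) (by rw [show xs.length = ys.length from by simpa using hl]; exact enc_lt ys)).symm

-- ---- sizes ----
lemma size_enc_head1 (xs : List Int) :
    Nat.size (encB (1 :: xs)) = xs.length + 1 := by
  have h1 : encB (1 :: xs) = 2 ^ xs.length + encB xs := by
    rw [enc_cons]; norm_num
  have hlo : 2 ^ xs.length ≤ encB (1 :: xs) := by rw [h1]; omega
  have hhi : encB (1 :: xs) < 2 ^ (xs.length + 1) := enc_lt (1 :: xs)
  have h2 := Nat.size_le.mpr hhi
  have h3 := Nat.lt_size.mpr hlo
  omega

lemma reduB_small {n : Nat} (h : Nat.size n < 294) : ∀ f, reduB f n = n := by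
  intro f
  cases f with
  | zero => rfl
  | succ f => rw [reduB, if_pos h]

-- ---- the divisor as an integer ----
lemma pxNat_enc : encB pxA = pxNat := by decide

lemma pxNat_shift (s : Nat) : pxNat <<< s = encB (pxA ++ List.replicate s 0) := by
  rw [enc_append, enc_repl0, List.length_replicate, Nat.shiftLeft_eq, pxNat_enc]
  omega

-- the reduction step on the packed bits is the XOR of the shifted divisor
lemma step_eq (xs : List Int) (s : Nat) (hb : IsBits xs) (hl : xs.length = 293 + s) :
    encB (1 :: xs) ^^^ (pxNat <<< s)
      = encB (List.zipWith add2 xs (pxA.drop 1 ++ List.replicate s 0)) := by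
  have hPb : IsBits (pxA ++ List.replicate s 0) := by
    intro x hx
    rcases List.mem_append.mp hx with h | h
    · exact pxA_bits x h
    · exact Or.inl (List.eq_of_mem_replicate h)
  have hlen : (1 :: xs).length = (pxA ++ List.replicate s 0).length := by
    simp [pxA_len]; omega
  rw [pxNat_shift, ← enc_zipWith (1 :: xs) _ (by
      intro x hx
      rcases List.mem_cons.mp hx with h | h
      · exact Or.inr h
      · exact hb x h) hPb hlen]
  have hsplit : pxA ++ List.replicate s 0 = 1 :: (pxA.drop 1 ++ List.replicate s 0) := by
    conv_lhs => rw [pxA_cons]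
    simp
  rw [hsplit, List.zipWith_cons_cons, show add2 1 1 = 0 from by decide, enc_cons]
  simp

-- ---- decoding: bin(n) on a head-1 bit list inverts the packing ----
lemma binB_step (m c : Nat) (hm : 1 ≤ m) (hc : c ≤ 1) :
    binB (2 * m + c) = binB m ++ [((c : Nat) : Int)] := by
  rw [binB]
  rw [dif_neg (by omega)]
  congr 2
  · omega
  · omega

lemma binB_enc_head1 : ∀ xs : List Int, IsBits xs → binB (encB (1 :: xs)) = 1 :: xs := by
  intro xs
  induction xs using List.reverseRecOn with
  | nil =>
    intro _
    have h1 : encB [(1:Int)] = 1 := by decide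
    rw [h1, binB, dif_neg one_ne_zero]
    rw [show (1:Nat)/2 = 0 from rfl, binB]
    simp
  | append_singleton ys b ih =>
    intro hb
    have hysb : IsBits ys := fun x hx => hb x (by simp [hx])
    have hbb : b = 0 ∨ b = 1 := hb b (by simp)
    have henc : encB (1 :: (ys ++ [b])) = 2 * encB (1 :: ys) + (PySem.Int.mod b 2).toNat := by
      rw [show (1:Int) :: (ys ++ [b]) = (1 :: ys) ++ [b] from by simp,
        enc_append, show encB [b] = (PySem.Int.mod b 2).toNat * 2 ^ (0:Nat) + encB [] from enc_cons b [],
        show encB ([] : List Int) = 0 from rfl]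
      simp [List.length_cons]
      ring
    have hge : 1 ≤ encB (1 :: ys) := by
      have : 2 ^ ys.length ≤ encB (1 :: ys) := by
        rw [enc_cons]
        simp
      have h2 : (1:Nat) ≤ 2 ^ ys.length := Nat.one_le_two_pow
      omega
    rw [henc, binB_step _ _ hge (mod2_toNat_le b), ih hysb]
    have hcast : (((PySem.Int.mod b 2).toNat : Nat) : Int) = b := by
      rcases hbb with h | h <;> subst h <;> decide
    rw [hcast]
    rfl

lemma rz_eq_toBits : ∀ l : List Int, IsBits l → l ≠ [] → rz l = toBitsB (encB l) := by
  intro l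
  induction l using rz.induct with
  | case1 => intro _ h; exact absurd rfl h
  | case2 x =>
    intro hb _
    rcases hb x (by simp) with h | h <;> subst h
    · rfl
    · rw [show encB [(1:Int)] = 1 from rfl, toBitsB, if_neg one_ne_zero, binB,
        dif_neg one_ne_zero, show (1:Nat)/2 = 0 from rfl, binB]
      rfl
  | case3 y l ih =>
    intro hb _
    rw [show rz (0 :: y :: l) = rz (y :: l) from by simp [rz],
      show encB (0 :: y :: l) = encB (y :: l) from by rw [enc_cons]; simp]
    exact ih (fun x hx => hb x (by simp at hx ⊢; tauto)) (by simp)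
  | case4 x y l hx =>
    intro hb _
    have hx1 : x = 1 := by
      rcases hb x (by simp) with h | h
      · exact absurd h hx
      · exact h
    subst hx1
    rw [rz_cons_ne _ _ _ one_ne_zero]
    have hpos : encB (1 :: y :: l) ≠ 0 := by
      have : 2 ^ (y :: l).length ≤ encB (1 :: y :: l) := by
        rw [enc_cons]; simp
      have h2 : (1:Nat) ≤ 2 ^ (y :: l).length := Nat.one_le_two_pow
      omega
    rw [toBitsB, if_neg hpos, binB_enc_head1 (y :: l) (fun z hz => hb z (by simp at hz ⊢; tauto))]

-- ---- the main bridge: the sweep computes B's fueled XOR loop ----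
lemma bridge : ∀ (N : Nat) (l : List Int), l.length ≤ N → IsBits l → l ≠ [] →
    ∀ f, l.length ≤ 293 + f → rz (dloop pxA l) = toBitsB (reduB f (encB l)) := by
  intro N
  induction N with
  | zero =>
    intro l hN _ hne _ _
    cases l with
    | nil => exact absurd rfl hne
    | cons x xs => simp at hN
  | succ N ih =>
    intro l hN hb hne f hf
    by_cases h294 : l.length < 294
    · rw [dloop_short h294,
        reduB_small (by
          have := Nat.size_le.mpr (lt_of_lt_of_le (enc_lt l) (Nat.pow_le_pow_right (by norm_num) (by omega : l.length ≤ 293)))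
          omega) f]
      exact rz_eq_toBits l hb hne
    · obtain ⟨x, xs, rfl⟩ : ∃ x xs, l = x :: xs := by
        cases l with
        | nil => exact absurd rfl hne
        | cons x xs => exact ⟨x, xs, rfl⟩
      have hxs293 : 293 ≤ xs.length := by simp at h294; omega
      have hxsne : xs ≠ [] := by intro h0; rw [h0] at hxs293; simp at hxs293
      have hxsb : IsBits xs := fun z hz => hb z (by simp [hz])
      rcases hb x (by simp) with hx0 | hx1
      · -- leading 0: drop it on both sides
        subst hx0
        rw [dloop_cons_ne hxs293 (by norm_num), rz_cons0 (dloop_ne_nil hxsne),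
          show encB (0 :: xs) = encB xs from by rw [enc_cons]; simp]
        exact ih xs (by simp at hN; omega) hxsb hxsne f (by simp at hf; omega)
      · -- leading 1: one cancelling XOR step on both sides
        subst hx1
        obtain ⟨f, rfl⟩ : ∃ f', f = f' + 1 := by
          cases f with
          | zero => simp at hf; omega
          | succ f => exact ⟨f, rfl⟩
        set s := xs.length - 293 with hs
        have hxlen : xs.length = 293 + s := by omega
        set u := List.zipWith add2 xs (pxA.drop 1 ++ List.replicate s 0) with hu
        have hulen : u.length = xs.length := by
          rw [hu, List.length_zipWith, List.length_append, List.length_replicate, pxA_drop1_len]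
          omega
        have hune : u ≠ [] := by intro h0; rw [h0] at hulen; simp at hulen; omega
        have hub : IsBits u := hu ▸ zw_bits _ _
        -- A-side sweep step
        have hok : List.zipWith add2 xs (pxA.drop 1) ++ xs.drop 293 = u := by
          rw [hu, show s = xs.length - 293 from hs, udecomp xs hxs293,
            bits_map_id (fun z hz => hxsb z (List.drop_subset _ _ hz))]
        rw [dloop_cons_one hxs293, hok, rz_cons0 (dloop_ne_nil hune)]
        -- B-side XOR step
        have hsize : Nat.size (encB (1 :: xs)) = xs.length + 1 := size_enc_head1 xs
        rw [reduB, if_neg (by omega),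
          show Nat.size (encB (1 :: xs)) - 294 = s from by omega,
          step_eq xs s hxsb hxlen, ← hu]
        exact ih u (by simp only [List.length_cons] at hN; omega) hub hune f
          (by simp only [List.length_cons] at hf; omega)

-- ---- final glue for B's port ----
lemma trim_eq_rz : ∀ a : List Int, a ≠ [] →
    a.drop ((List.findIdx? (fun x => x != 0) a).getD (a.length - 1)) = rz a := by
  intro a
  induction a using rz.induct with
  | case1 => intro h; exact absurd rfl h
  | case2 x =>
    intro _
    by_cases hx : x = 0
    · subst hx; simp [List.findIdx?_cons, rz]
    · simp [List.findIdx?_cons, hx, rz]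
  | case3 y l ih =>
    intro _
    rw [List.findIdx?_cons]
    simp only [show ((0:Int) != 0) = false from rfl, Bool.false_eq_true, if_false]
    rw [show rz (0 :: y :: l) = rz (y :: l) from by simp [rz]]
    cases hidx : List.findIdx? (fun x => x != 0) (y :: l) with
    | none =>
      simp only [Option.map_none, Option.getD_none] at ih ⊢
      rw [show (0 :: y :: l : List Int).length - 1 = (y :: l).length from by simp,
        show ((0:Int) :: y :: l).drop (y :: l).length = (y :: l).drop ((y :: l).length - 1) from by
          simp [List.drop_succ_cons]]
      have h2 := ih (by simp)
      rw [hidx] at h2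
      simpa using h2
    | some i =>
      simp only [Option.map_some, Option.getD_some] at ih ⊢
      rw [List.drop_succ_cons]
      have h2 := ih (by simp)
      rw [hidx] at h2
      simpa using h2
  | case4 x y l hx =>
    intro _
    rw [List.findIdx?_cons, if_pos (by simp [hx]), Option.getD_some, List.drop_zero,
      rz_cons_ne _ _ _ hx]

lemma alt_eq (a : List Int) (ha : a ≠ []) : mod_px_lst_alt a = Bcore (rz a) := by
  rw [mod_px_lst_alt]
  simp only [trim_eq_rz a ha]
  by_cases h294 : (rz a).length < 294
  · rw [if_pos h294, Bcore, if_pos h294]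
  · rw [if_neg h294, Bcore, if_neg h294]
    have hm : (rz a).map (fun x => PySem.Int.mod x 2) ≠ [] := by
      intro h0
      have := congrArg List.length h0
      simp at this
      exact (rz_ne_nil ha) this
    rw [show encB (rz a) = encB ((rz a).map (fun x => PySem.Int.mod x 2)) from
        (enc_map_mod2 (rz a)).symm]
    have hb : IsBits ((rz a).map (fun x => PySem.Int.mod x 2)) := by
      intro z hz
      obtain ⟨w, _, rfl⟩ := List.mem_map.mp hz
      exact mod2_bit w
    have hlen : ((rz a).map (fun x => PySem.Int.mod x 2)).length = (rz a).length :=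
      List.length_map ..
    exact (bridge ((rz a).length) _ (by omega) hb hm ((rz a).length) (by omega)).symm

-- ===== VERDICT (by name: the statement is the Claim_ definition above) =====
theorem mod_px_lst_spec : Claim_equal_mod_px_lst := by
  intro a _ hpre
  unfold Spec_mod_px_lst
  rw [alt_eq a hpre, mod_px_lst,
    main_all (a.length + 2) a hpre (by have := rz_length_le a; omega)]
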